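-- pv_equiv track=rewrite | github.com/adrfarod/python2013 | proyecto.py | limpiarComentario
-- ===== SOURCE A (Python) =====
-- def limpiarComentario(lineas):
-- 	flag = 0
-- 	nuevasLineas = []
-- 	for str in lineas:
-- 		if '<devices>' in str:
-- 			flag = 1
-- 		if flag == 1:
-- 			nuevasLineas.append(str)
-- 	return nuevasLineas
-- ===== SOURCE B (Python) =====
-- def limpiarComentario(lineas):
-- 	indice = next((i for i, s in enumerate(lineas) if '<devices>' in s), None)
-- 	if indice is None:
-- 		return []
-- 	return lineas[indice:]
-- ===== Notes on version B (the rewrite author's own statement) =====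
-- stated objective: idiomatic
-- what changed: Replaces the flag variable and element-by-element accumulator with a staged search-then-slice: first locate the index of the first line containing '<devices>', then return the list sliced from that index (or [] if absent), so no output list is built incrementally.
import Mathlib
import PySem

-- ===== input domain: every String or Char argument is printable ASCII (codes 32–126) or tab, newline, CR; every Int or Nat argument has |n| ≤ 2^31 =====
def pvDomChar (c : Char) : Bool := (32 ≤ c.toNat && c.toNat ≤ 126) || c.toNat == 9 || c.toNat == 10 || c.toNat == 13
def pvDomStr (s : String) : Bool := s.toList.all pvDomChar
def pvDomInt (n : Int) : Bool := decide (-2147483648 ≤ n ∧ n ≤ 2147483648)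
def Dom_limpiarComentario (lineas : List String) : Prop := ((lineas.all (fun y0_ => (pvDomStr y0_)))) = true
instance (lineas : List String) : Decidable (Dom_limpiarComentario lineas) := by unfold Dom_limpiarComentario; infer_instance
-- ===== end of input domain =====

-- B replaces A's flag/accumulator loop by a staged search-then-slice (idiomatic; same cost).


-- ===== PORT A =====
-- transliteration of A: flag/accumulator loop over the lines (one iteration of the for-body)
def pvStepA (st : Int × List String) (str : String) : Int × List String :=
  let flag := if PySem.Str.isIn "<devices>" str then 1 else st.1
  let nuevasLineas := if flag = 1 then st.2 ++ [str] else st.2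
  (flag, nuevasLineas)

def limpiarComentario (lineas : List String) : List String :=
  (lineas.foldl pvStepA (0, [])).2

-- ===== PORT B =====
-- transliteration of B: find the index of the first line containing '<devices>'
-- (enumerate + first match = List.findIdx?), then slice the list from that index
-- (lineas[indice:] with a nonnegative index = List.drop), or [] if no match.
def limpiarComentario_alt (lineas : List String) : List String :=
  match lineas.findIdx? (fun s => PySem.Str.isIn "<devices>" s) with
  | none => []
  | some indice => lineas.drop indice

-- ===== PRECONDITION & SPEC =====
def Spec_limpiarComentario (lineas : List String) (out : List String) : Prop := out = limpiarComentario_alt lineas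
instance (lineas : List String) (out : List String) : Decidable (Spec_limpiarComentario lineas out) := by unfold Spec_limpiarComentario; infer_instance

-- ===== CLAIM (what is proved, stated in full; the proofs are below) =====
def Claim_equal_limpiarComentario : Prop := ∀ (lineas : List String), Dom_limpiarComentario lineas → Spec_limpiarComentario lineas (limpiarComentario lineas)

-- ===== LEMMAS AND PROOFS =====

theorem pvFoldl_flag1 (l : List String) (acc : List String) :
    l.foldl pvStepA (1, acc) = (1, acc ++ l) := by
  induction l generalizing acc with
  | nil => simp
  | cons s t ih =>
      have hs : pvStepA (1, acc) s = (1, acc ++ [s]) := by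
        simp [pvStepA]
      rw [List.foldl_cons, hs, ih]
      simp

theorem pvFoldl_flag0 (l : List String) (acc : List String) :
    (l.foldl pvStepA (0, acc)).2
      = acc ++ (match l.findIdx? (fun s => PySem.Str.isIn "<devices>" s) with
                | none => []
                | some indice => l.drop indice) := by
  induction l generalizing acc with
  | nil => simp
  | cons s t ih =>
      by_cases h : PySem.Chars.isIn ['<','d','e','v','i','c','e','s','>'] s.toList = true
      · have hs : pvStepA (0, acc) s = (1, acc ++ [s]) := by
          simp [pvStepA, PySem.Str.isIn, h]
        rw [List.foldl_cons, hs, pvFoldl_flag1]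
        simp [List.findIdx?_cons, PySem.Str.isIn, h]
      · have hs : pvStepA (0, acc) s = (0, acc) := by
          simp [pvStepA, PySem.Str.isIn, h]
        rw [List.foldl_cons, hs, ih]
        cases hf : t.findIdx? (fun s => PySem.Chars.isIn ['<','d','e','v','i','c','e','s','>'] s.toList) with
        | none => simp [PySem.Str.isIn, List.findIdx?_cons, if_neg h, hf]
        | some i => simp [PySem.Str.isIn, List.findIdx?_cons, if_neg h, hf]

-- ===== VERDICT (by name: the statement is the Claim_ definition above) =====
theorem limpiarComentario_spec : Claim_equal_limpiarComentario := by
  intro lineas _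
  unfold Spec_limpiarComentario limpiarComentario limpiarComentario_alt
  simpa using pvFoldl_flag0 lineas []
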